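-- pv_equiv track=rewrite | github.com/malikinss/PyGen | PyGen for Advanced/2_python_basic_constructions/2_2_basic_constructions/2_2_9_count_max_heads/2_2_9_count_max_heads.py | count_max_heads
-- ===== SOURCE A (Python) =====
-- def count_max_heads(s: str) -> int:
--     """
--     Counts the greatest number of consecutive 'H's in the given string.
--
--     Parameters:
--     - s (str): The input string consisting of 'H' and 'T'.
--
--     Returns:
--     - int: The maximum number of consecutive 'H's.
--     """
--     max_heads = 0  # To track the maximum consecutive heads
--     current_heads = 0  # To track the current streak of heads
--
--     for char in s:
--         if char == 'H':
--             current_heads += 1  # Increase the current streak of heads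
--
--             # Update the maximum streak
--             max_heads = max(max_heads, current_heads)
--         else:
--             current_heads = 0  # Reset the streak when 'T' is encountered
--
--     return max_heads
-- ===== SOURCE B (Python) =====
-- import re
--
-- def count_max_heads(s: str) -> int:
--     """Find all maximal runs of 'H' with a regex, then take the longest."""
--     return max((len(m) for m in re.findall('H+', s)), default=0)
-- ===== Notes on version B (the rewrite author's own statement) =====
-- stated objective: alternative
-- what changed: Replaced the stateful running-counter loop by a find-all-maximal-'H'-runs (regex 'H+') pass followed by a max-reduce with default 0.
import Mathlib
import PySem

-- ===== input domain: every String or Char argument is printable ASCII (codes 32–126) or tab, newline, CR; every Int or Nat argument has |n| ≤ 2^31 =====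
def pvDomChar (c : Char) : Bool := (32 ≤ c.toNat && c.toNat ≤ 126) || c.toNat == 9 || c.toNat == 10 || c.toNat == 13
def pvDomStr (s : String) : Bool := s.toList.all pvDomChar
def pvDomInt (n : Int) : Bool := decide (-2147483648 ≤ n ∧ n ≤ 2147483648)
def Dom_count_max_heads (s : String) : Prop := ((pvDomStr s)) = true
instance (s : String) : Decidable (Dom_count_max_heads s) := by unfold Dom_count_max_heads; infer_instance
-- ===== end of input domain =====

-- B replaces A's running-counter loop by "collect all maximal 'H' runs, then take the longest (default 0)"; alternative decomposition, same O(n) cost.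

-- ===== PORT A =====
-- the for-loop of A over the characters, state (max_heads, current_heads)
def pvLoopA : List Char → Int → Int → Int
  | [], max_heads, _ => max_heads
  | c :: t, max_heads, current_heads =>
    if c = 'H' then
      pvLoopA t (max max_heads (current_heads + 1)) (current_heads + 1)
    else
      pvLoopA t max_heads 0

def count_max_heads (s : String) : Int := pvLoopA s.toList 0 0

-- ===== PORT B =====
-- re.findall('H+', s): the lengths of the maximal runs of 'H', left to right (exact for this pattern)
def pvRunsH : List Char → List Nat
  | [] => []
  | c :: t =>
    if c = 'H' then
      (1 + (t.takeWhile (· = 'H')).length) :: pvRunsH (t.dropWhile (· = 'H'))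
    else
      pvRunsH t
termination_by cs => cs.length
decreasing_by
  · exact Nat.lt_succ_of_le (t.length_dropWhile_le _)
  · exact Nat.lt_succ_of_le (Nat.le_refl _)

-- max((len(m) for m in re.findall('H+', s)), default=0)
def count_max_heads_alt (s : String) : Int :=
  PySem.List.maxD ((pvRunsH s.toList).map (fun n => Int.ofNat n)) (fun x => x) 0

-- ===== PRECONDITION & SPEC =====
def Spec_count_max_heads (s : String) (out : Int) : Prop := out = count_max_heads_alt s
instance (s : String) (out : Int) : Decidable (Spec_count_max_heads s out) := by unfold Spec_count_max_heads; infer_instance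

-- ===== CLAIM (what is proved, stated in full; the proofs are below) =====
def Claim_equal_count_max_heads : Prop := ∀ (s : String), Dom_count_max_heads s → Spec_count_max_heads s (count_max_heads s)

-- ===== LEMMAS AND PROOFS =====

-- the value A's loop tracks: the best streak reachable from current streak ch over the rest cs
def pvG : Int → List Char → Int
  | ch, [] => ch
  | ch, c :: t => if c = 'H' then pvG (ch + 1) t else max ch (pvG 0 t)

theorem pvG_ge (cs : List Char) : ∀ ch : Int, ch ≤ pvG ch cs := by
  induction cs with
  | nil => intro ch; simp [pvG]
  | cons c t ih =>
    intro ch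
    by_cases h : c = 'H'
    · simpa [pvG, h] using le_trans (by omega : ch ≤ ch + 1) (ih (ch + 1))
    · simp only [pvG, h, if_false]
      exact le_max_left _ _

theorem pvLoopA_eq (cs : List Char) : ∀ mh ch : Int, 0 ≤ ch → ch ≤ mh →
    pvLoopA cs mh ch = max mh (pvG ch cs) := by
  induction cs with
  | nil => intro mh ch _ h2; simp [pvLoopA, pvG]; omega
  | cons c t ih =>
    intro mh ch h1 h2
    by_cases h : c = 'H' <;> simp only [pvLoopA, pvG, h, if_true, if_false]
    · rw [ih (max mh (ch + 1)) (ch + 1) (by omega) (le_max_right _ _)]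
      have := pvG_ge t (ch + 1)
      omega
    · rw [ih mh 0 (le_refl 0) (by omega)]
      have := pvG_ge t (0 : Int)
      omega

theorem pvG_run (t : List Char) : ∀ ch : Int, 0 ≤ ch →
    pvG ch t = max (ch + ((t.takeWhile (· = 'H')).length : Int))
                   (pvG 0 (t.dropWhile (· = 'H'))) := by
  induction t with
  | nil => intro ch h; simp [pvG]; omega
  | cons c t ih =>
    intro ch h
    by_cases hc : c = 'H'
    · simp only [pvG, hc, List.takeWhile_cons, List.dropWhile_cons,
        decide_true, if_pos, List.length_cons]
      rw [ih (ch + 1) (by omega)]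
      push_cast
      omega
    · simp only [pvG, hc, if_false, List.takeWhile_cons, List.dropWhile_cons,
        decide_eq_true_eq, if_neg hc, List.length_nil]
      have := pvG_ge t (0 : Int)
      push_cast
      omega

def pvF (rs : List Nat) : Int := (rs.map (fun n => Int.ofNat n)).foldl max 0

theorem foldl_max_shift (l : List Int) : ∀ a b : Int,
    List.foldl max (max a b) l = max a (List.foldl max b l) := by
  induction l with
  | nil => intro a b; simp
  | cons x t ih =>
    intro a b
    simp only [List.foldl]
    rw [max_assoc, ih]

theorem pvF_cons (r : Nat) (rs : List Nat) :
    pvF (r :: rs) = max (Int.ofNat r) (pvF rs) := by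
  unfold pvF
  simp only [List.map_cons, List.foldl]
  rw [show max (0 : Int) (Int.ofNat r) = max (Int.ofNat r) 0 from max_comm _ _,
      foldl_max_shift]

theorem pvG_eq_F : ∀ cs : List Char, pvG 0 cs = pvF (pvRunsH cs) := by
  intro cs
  induction cs using pvRunsH.induct with
  | case1 => simp [pvG, pvRunsH, pvF]
  | case2 t ih =>
    have h0 : pvG (0 : Int) ('H' :: t) = pvG 1 t := by simp [pvG]
    have h1 : pvRunsH ('H' :: t)
        = (1 + (t.takeWhile (· = 'H')).length) :: pvRunsH (t.dropWhile (· = 'H')) := by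
      simp [pvRunsH]
    rw [h0, pvG_run t 1 (by omega), ih, h1, pvF_cons]
    have h2 : Int.ofNat (1 + (t.takeWhile (· = 'H')).length)
        = 1 + ((t.takeWhile (· = 'H')).length : Int) := by
      simp only [Int.ofNat_eq_natCast]; push_cast; ring
    rw [h2]
  | case3 c t hc ih =>
    have h0 : pvG (0 : Int) (c :: t) = max 0 (pvG 0 t) := by simp [pvG, hc]
    have := pvG_ge t (0 : Int)
    rw [h0, max_eq_right (by omega), ih]
    simp [pvRunsH, hc]

theorem alt_eq_F (s : String) : count_max_heads_alt s = pvF (pvRunsH s.toList) := by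
  unfold count_max_heads_alt
  cases h : pvRunsH s.toList with
  | nil => simp [PySem.List.maxD, PySem.List.max?, pvF]
  | cons r rs =>
    rw [List.map_cons, pvF_cons]
    unfold PySem.List.maxD
    rw [PySem.List.max?_id_cons]
    simp only [Option.getD_some]
    have h2 := foldl_max_shift (rs.map (fun n => Int.ofNat n)) (Int.ofNat r) 0
    rw [max_eq_left (by simp [Int.ofNat_eq_natCast] : (0 : Int) ≤ Int.ofNat r)] at h2
    exact h2

-- ===== VERDICT (by name: the statement is the Claim_ definition above) =====
theorem count_max_heads_spec : Claim_equal_count_max_heads := by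
  intro s _
  unfold Spec_count_max_heads count_max_heads
  rw [pvLoopA_eq s.toList 0 0 (le_refl 0) (le_refl 0), alt_eq_F, ← pvG_eq_F]
  have := pvG_ge s.toList (0 : Int)
  omega
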